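-- pv_equiv track=rewrite | github.com/et007693/SSAFY_TIL | Algorithm/0206_string2/4861_swea.py | circular_letter
-- ===== SOURCE A (Python) =====
-- def circular_letter(array, n, m):
--     num = m//2
--     circular = ''
--
--     for i in range(n-m+1):
--         arr = array[i:i+m]
--         if arr == arr[::-1]:
--             circular = arr
--     return circular
-- ===== SOURCE B (Python) =====
-- def circular_letter(array, n, m):
--     # Precompute maximal palindromic radii around every center (odd and even),
--     # then each window is tested in O(1) by a radius lookup, scanning from the right.
--     L = len(array)
--     odd = []
--     for c in range(L):
--         r = 0
--         while r + 1 <= c and c + r + 1 < L and array[c - r - 1] == array[c + r + 1]: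
--             r += 1
--         odd.append(r)
--     even = []
--     for c in range(L + 1):
--         r = 0
--         while r + 1 <= c and c + r < L and array[c - r - 1] == array[c + r]:
--             r += 1
--         even.append(r)
--     for i in range(n - m, -1, -1):
--         s = array[i:i + m]
--         ln = len(s)
--         if ln <= 1:
--             return s
--         c = min(i, L) + ln // 2
--         if (odd[c] * 2 + 1 >= ln) if ln % 2 == 1 else (even[c] * 2 >= ln):
--             return s
--     return ''
-- ===== Notes on version B (the rewrite author's own statement) =====
-- stated objective: alternative
-- what changed: B precomputes the maximal palindromic radius around every center of the string (expand-around-center tables), answers each window's palindromicity by a single O(1) radius lookup, and scans the windows from the right returning the first hit, instead of A's left-to-right fold that slices and reverses every window.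
import Mathlib
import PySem

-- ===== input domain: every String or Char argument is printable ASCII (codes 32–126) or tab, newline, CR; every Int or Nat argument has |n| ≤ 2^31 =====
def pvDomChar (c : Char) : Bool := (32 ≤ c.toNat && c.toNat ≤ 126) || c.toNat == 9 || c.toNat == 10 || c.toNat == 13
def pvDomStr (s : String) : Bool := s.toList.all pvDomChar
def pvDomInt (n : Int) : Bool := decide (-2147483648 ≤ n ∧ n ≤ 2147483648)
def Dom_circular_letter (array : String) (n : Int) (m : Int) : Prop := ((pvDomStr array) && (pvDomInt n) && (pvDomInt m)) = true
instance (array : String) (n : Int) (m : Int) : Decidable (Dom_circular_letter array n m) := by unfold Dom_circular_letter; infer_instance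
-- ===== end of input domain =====

-- B precomputes palindromic radii around every center, answers each window by an O(1)
-- radius lookup and scans the windows from the right (alternative algorithm, same result).

-- ===== PORT A =====
-- num = m//2; for i in range(n-m+1): arr = array[i:i+m]; if arr == arr[::-1]: circular = arr
def circular_letter (array : String) (n : Int) (m : Int) : String :=
  let _num := PySem.Int.floordiv m 2
  String.ofList ((PySem.List.pyRange 0 (n - m + 1) 1).foldl
    (fun circular i =>
      let arr := PySem.List.slice array.toList (some i) (some (i + m))
      if arr == arr.reverse then arr else circular) [])

-- ===== PORT B =====
-- while r + 1 <= c and c + r + 1 < L and array[c-r-1] == array[c+r+1]: r += 1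
-- (the guard guarantees both indices are in range, so pyGetD is exact)
def pvOddLoop (cs : List Char) (c r : Nat) : Nat :=
  if h : r + 1 ≤ c ∧ c + r + 1 < cs.length ∧
      PySem.List.pyGetD cs ((c : Int) - (r : Int) - 1) ' ' = PySem.List.pyGetD cs ((c : Int) + (r : Int) + 1) ' '
  then pvOddLoop cs c (r + 1) else r
termination_by cs.length - r
decreasing_by obtain ⟨-, h2, -⟩ := h; omega

-- while r + 1 <= c and c + r < L and array[c-r-1] == array[c+r]: r += 1
def pvEvenLoop (cs : List Char) (c r : Nat) : Nat :=
  if h : r + 1 ≤ c ∧ c + r < cs.length ∧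
      PySem.List.pyGetD cs ((c : Int) - (r : Int) - 1) ' ' = PySem.List.pyGetD cs ((c : Int) + (r : Int)) ' '
  then pvEvenLoop cs c (r + 1) else r
termination_by cs.length - r
decreasing_by obtain ⟨-, h2, -⟩ := h; omega

-- for i in range(n-m, -1, -1): s = array[i:i+m]; <O(1) radius test>; return s on success
def pvScanB (cs : List Char) (m : Int) (oddT evenT : List Nat) : List Int → List Char
  | [] => []
  | i :: rest =>
      let s := PySem.List.slice cs (some i) (some (i + m))
      let ln : Int := s.length
      if ln ≤ 1 then s
      else
        let c := min i (cs.length : Int) + PySem.Int.floordiv ln 2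
        let ok : Bool :=
          if PySem.Int.mod ln 2 = 1
          then decide (((PySem.List.pyGetD oddT c 0 : Nat) : Int) * 2 + 1 ≥ ln)
          else decide (((PySem.List.pyGetD evenT c 0 : Nat) : Int) * 2 ≥ ln)
        if ok then s else pvScanB cs m oddT evenT rest

def circular_letter_alt (array : String) (n : Int) (m : Int) : String :=
  let cs := array.toList
  let oddT := (List.range cs.length).map (fun c => pvOddLoop cs c 0)
  let evenT := (List.range (cs.length + 1)).map (fun c => pvEvenLoop cs c 0)
  String.ofList (pvScanB cs m oddT evenT (PySem.List.pyRange (n - m) (-1) (-1)))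

-- ===== PRECONDITION & SPEC =====
def Spec_circular_letter (array : String) (n : Int) (m : Int) (out : String) : Prop := out = circular_letter_alt array n m
instance (array : String) (n : Int) (m : Int) (out : String) : Decidable (Spec_circular_letter array n m out) := by unfold Spec_circular_letter; infer_instance

-- ===== CLAIM (what is proved, stated in full; the proofs are below) =====
def Claim_equal_circular_letter : Prop := ∀ (array : String) (n : Int) (m : Int), Dom_circular_letter array n m → Spec_circular_letter array n m (circular_letter array n m)

-- ===== LEMMAS AND PROOFS =====

def pvPal (s : List Char) : Bool := s == s.reverse
def pvWin (cs : List Char) (l i : Nat) : List Char := (cs.drop i).take l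

theorem pvPal_cons_append (a b : Char) (s : List Char) :
    pvPal (a :: (s ++ [b])) = ((a == b) && pvPal s) := by
  unfold pvPal
  rw [Bool.eq_iff_iff]
  simp only [Bool.and_eq_true, beq_iff_eq]
  rw [show (a :: (s ++ [b])).reverse = b :: (s.reverse ++ [a]) from by simp]
  constructor
  · intro h
    rw [List.cons.injEq] at h
    obtain ⟨rfl, h2⟩ := h
    exact ⟨rfl, by rwa [List.append_left_inj] at h2⟩
  · rintro ⟨rfl, h⟩
    rw [List.cons.injEq]
    exact ⟨rfl, by rw [← h]⟩

theorem pvWin_decomp (cs : List Char) (l i : Nat) (h : i + l + 1 < cs.length) :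
    pvWin cs (l + 2) i = cs[i] :: (pvWin cs l (i + 1) ++ [cs[i + l + 1]]) := by
  unfold pvWin
  rw [List.drop_eq_getElem_cons (by omega), show l + 2 = (l + 1) + 1 from rfl,
    List.take_succ_cons, List.take_add_one]
  congr 1
  rw [List.getElem?_drop, List.getElem?_eq_getElem (by omega)]
  simp [show i + 1 + l = i + l + 1 from by omega]

theorem pvWin_one (cs : List Char) (c : Nat) (hc : c < cs.length) :
    pvWin cs 1 c = [cs[c]] := by
  unfold pvWin
  rw [List.take_one, List.head?_drop, List.getElem?_eq_getElem hc]
  rfl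

theorem pvPal_small (s : List Char) (h : s.length ≤ 1) : pvPal s = true := by
  match s, h with
  | [], _ => rfl
  | [a], _ => simp [pvPal]

-- the matching-pairs conditions around a center
def pvPairsOdd (cs : List Char) (c k : Nat) : Prop :=
  ∀ d : Nat, 1 ≤ d → d ≤ k → cs.getD (c - d) ' ' = cs.getD (c + d) ' '
def pvPairsEven (cs : List Char) (c k : Nat) : Prop :=
  ∀ d : Nat, 1 ≤ d → d ≤ k → cs.getD (c - d) ' ' = cs.getD (c + d - 1) ' '

theorem pvPal_center_odd (cs : List Char) : ∀ (j c : Nat), j ≤ c → c + j < cs.length →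
    (pvPal (pvWin cs (2 * j + 1) (c - j)) = true ↔ pvPairsOdd cs c j) := by
  intro j
  induction j with
  | zero =>
    intro c _ hc
    rw [show 2 * 0 + 1 = 1 from rfl, Nat.sub_zero, pvWin_one cs c (by omega)]
    simp only [pvPal, pvPairsOdd]
    constructor
    · intro _ d h1 h2
      omega
    · intro _
      simp
  | succ j ih =>
    intro c hjc hcj
    rw [show 2 * (j + 1) + 1 = (2 * j + 1) + 2 from by ring,
      pvWin_decomp cs (2 * j + 1) (c - (j + 1)) (by omega)]
    simp only [show c - (j + 1) + 1 = c - j from by omega,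
      show c - (j + 1) + (2 * j + 1) + 1 = c + j + 1 from by omega]
    rw [pvPal_cons_append]
    rw [Bool.and_eq_true, beq_iff_eq, ih c (by omega) (by omega)]
    constructor
    · rintro ⟨hp, hrest⟩
      intro d h1 hd
      rcases Nat.lt_or_ge d (j + 1) with hlt | hge
      · exact hrest d h1 (by omega)
      · have hdj : d = j + 1 := by omega
        subst hdj
        rw [List.getD_eq_getElem _ _ (by omega), List.getD_eq_getElem _ _ (by omega)]
        exact hp
    · intro hall
      constructor
      · have := hall (j + 1) (by omega) le_rfl
        rwa [List.getD_eq_getElem _ _ (by omega), List.getD_eq_getElem _ _ (by omega)] at this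
      · intro d h1 hd
        exact hall d h1 (by omega)

theorem pvPal_center_even (cs : List Char) : ∀ (j c : Nat), j ≤ c → c + j ≤ cs.length →
    (pvPal (pvWin cs (2 * j) (c - j)) = true ↔ pvPairsEven cs c j) := by
  intro j
  induction j with
  | zero =>
    intro c _ _
    simp only [pvPal, pvWin, pvPairsEven, Nat.mul_zero, List.take_zero]
    constructor
    · intro _ d h1 h2
      omega
    · intro _
      simp
  | succ j ih =>
    intro c hjc hcj
    rw [show 2 * (j + 1) = (2 * j) + 2 from by ring,
      pvWin_decomp cs (2 * j) (c - (j + 1)) (by omega)]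
    simp only [show c - (j + 1) + 1 = c - j from by omega,
      show c - (j + 1) + (2 * j) + 1 = c + j from by omega]
    rw [pvPal_cons_append]
    rw [Bool.and_eq_true, beq_iff_eq, ih c (by omega) (by omega)]
    constructor
    · rintro ⟨hp, hrest⟩
      intro d h1 hd
      rcases Nat.lt_or_ge d (j + 1) with hlt | hge
      · exact hrest d h1 (by omega)
      · have hdj : d = j + 1 := by omega
        subst hdj
        rw [show c + (j + 1) - 1 = c + j from by omega,
          List.getD_eq_getElem _ _ (by omega), List.getD_eq_getElem _ _ (by omega)]
        exact hp
    · intro hall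
      constructor
      · have := hall (j + 1) (by omega) le_rfl
        rw [show c + (j + 1) - 1 = c + j from by omega] at this
        rwa [List.getD_eq_getElem _ _ (by omega), List.getD_eq_getElem _ _ (by omega)] at this
      · intro d h1 hd
        exact hall d h1 (by omega)

theorem pvOddLoop_sound (cs : List Char) (c : Nat) :
    ∀ (k r : Nat), cs.length - r = k → pvPairsOdd cs c r →
      r ≤ pvOddLoop cs c r ∧ pvPairsOdd cs c (pvOddLoop cs c r) := by
  intro k
  induction k using Nat.strong_induction_on with
  | _ k ih =>
    intro r hk hp
    rw [pvOddLoop.eq_def]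
    split_ifs with h
    · obtain ⟨h1, h2, h3⟩ := h
      rw [show (c : Int) - (r : Int) - 1 = ((c - (r + 1) : Nat) : Int) from by omega,
        show (c : Int) + (r : Int) + 1 = ((c + (r + 1) : Nat) : Int) from by omega,
        PySem.List.pyGetD_natCast, PySem.List.pyGetD_natCast] at h3
      have hp' : pvPairsOdd cs c (r + 1) := by
        intro d h1d h2d
        rcases Nat.lt_or_ge d (r + 1) with hlt | hge
        · exact hp d h1d (by omega)
        · have hd : d = r + 1 := by omega
          subst hd
          exact h3
      have hrec := ih (cs.length - (r + 1)) (by omega) (r + 1) rfl hp'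
      exact ⟨by omega, hrec.2⟩
    · exact ⟨le_rfl, hp⟩

theorem pvOddLoop_complete (cs : List Char) (c k : Nat) (hkc : k ≤ c) (hkL : c + k < cs.length)
    (hp : pvPairsOdd cs c k) : ∀ (j r : Nat), k - r = j → r ≤ k → k ≤ pvOddLoop cs c r := by
  intro j
  induction j using Nat.strong_induction_on with
  | _ j ih =>
    intro r hj hr
    by_cases hrk : r < k
    · rw [pvOddLoop.eq_def, dif_pos ?_]
      · exact ih (k - (r + 1)) (by omega) (r + 1) rfl (by omega)
      · refine ⟨by omega, by omega, ?_⟩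
        have := hp (r + 1) (by omega) (by omega)
        rw [show (c : Int) - (r : Int) - 1 = ((c - (r + 1) : Nat) : Int) from by omega,
          show (c : Int) + (r : Int) + 1 = ((c + (r + 1) : Nat) : Int) from by omega,
          PySem.List.pyGetD_natCast, PySem.List.pyGetD_natCast]
        exact this
    · have hreq : r = k := by omega
      subst hreq
      exact (pvOddLoop_sound cs c (cs.length - r) r rfl hp).1
  
theorem pvOddVal_iff (cs : List Char) (c k : Nat) (hkc : k ≤ c) (hkL : c + k < cs.length) :
    (k ≤ pvOddLoop cs c 0) ↔ pvPairsOdd cs c k := by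
  constructor
  · intro hk d h1 h2
    have hs := pvOddLoop_sound cs c (cs.length - 0) 0 rfl (fun d h1 h2 => by omega)
    exact hs.2 d h1 (by omega)
  · intro hp
    exact pvOddLoop_complete cs c k hkc hkL hp (k - 0) 0 rfl (by omega)

theorem pvEvenLoop_sound (cs : List Char) (c : Nat) :
    ∀ (k r : Nat), cs.length - r = k → pvPairsEven cs c r →
      r ≤ pvEvenLoop cs c r ∧ pvPairsEven cs c (pvEvenLoop cs c r) := by
  intro k
  induction k using Nat.strong_induction_on with
  | _ k ih =>
    intro r hk hp
    rw [pvEvenLoop.eq_def]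
    split_ifs with h
    · obtain ⟨h1, h2, h3⟩ := h
      rw [show (c : Int) - (r : Int) - 1 = ((c - (r + 1) : Nat) : Int) from by omega,
        show (c : Int) + (r : Int) = ((c + (r + 1) - 1 : Nat) : Int) from by omega,
        PySem.List.pyGetD_natCast, PySem.List.pyGetD_natCast] at h3
      have hp' : pvPairsEven cs c (r + 1) := by
        intro d h1d h2d
        rcases Nat.lt_or_ge d (r + 1) with hlt | hge
        · exact hp d h1d (by omega)
        · have hd : d = r + 1 := by omega
          subst hd
          exact h3
      have hrec := ih (cs.length - (r + 1)) (by omega) (r + 1) rfl hp'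
      exact ⟨by omega, hrec.2⟩
    · exact ⟨le_rfl, hp⟩

theorem pvEvenLoop_complete (cs : List Char) (c k : Nat) (hkc : k ≤ c) (hkL : c + k ≤ cs.length)
    (hp : pvPairsEven cs c k) : ∀ (j r : Nat), k - r = j → r ≤ k → k ≤ pvEvenLoop cs c r := by
  intro j
  induction j using Nat.strong_induction_on with
  | _ j ih =>
    intro r hj hr
    by_cases hrk : r < k
    · rw [pvEvenLoop.eq_def, dif_pos ?_]
      · exact ih (k - (r + 1)) (by omega) (r + 1) rfl (by omega)
      · refine ⟨by omega, by omega, ?_⟩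
        have := hp (r + 1) (by omega) (by omega)
        rw [show (c : Int) - (r : Int) - 1 = ((c - (r + 1) : Nat) : Int) from by omega,
          show (c : Int) + (r : Int) = ((c + (r + 1) - 1 : Nat) : Int) from by omega,
          PySem.List.pyGetD_natCast, PySem.List.pyGetD_natCast]
        exact this
    · have hreq : r = k := by omega
      subst hreq
      exact (pvEvenLoop_sound cs c (cs.length - r) r rfl hp).1

theorem pvEvenVal_iff (cs : List Char) (c k : Nat) (hkc : k ≤ c) (hkL : c + k ≤ cs.length) :
    (k ≤ pvEvenLoop cs c 0) ↔ pvPairsEven cs c k := by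
  constructor
  · intro hk d h1 h2
    have hs := pvEvenLoop_sound cs c (cs.length - 0) 0 rfl (fun d h1 h2 => by omega)
    exact hs.2 d h1 (by omega)
  · intro hp
    exact pvEvenLoop_complete cs c k hkc hkL hp (k - 0) 0 rfl (by omega)

theorem pvPal_window_odd (cs : List Char) (a ln : Nat) (hodd : ln % 2 = 1) (hln : a + ln ≤ cs.length) :
    (pvPal (pvWin cs ln a) = true ↔ ln / 2 ≤ pvOddLoop cs (a + ln / 2) 0) := by
  have hc := pvPal_center_odd cs (ln / 2) (a + ln / 2) (by omega) (by omega)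
  rw [show a + ln / 2 - ln / 2 = a from by omega,
    show 2 * (ln / 2) + 1 = ln from by omega] at hc
  rw [hc, pvOddVal_iff cs (a + ln / 2) (ln / 2) (by omega) (by omega)]

theorem pvPal_window_even (cs : List Char) (a ln : Nat) (heven : ln % 2 = 0) (hln : a + ln ≤ cs.length) :
    (pvPal (pvWin cs ln a) = true ↔ ln / 2 ≤ pvEvenLoop cs (a + ln / 2) 0) := by
  have hc := pvPal_center_even cs (ln / 2) (a + ln / 2) (by omega) (by omega)
  rw [show a + ln / 2 - ln / 2 = a from by omega,
    show 2 * (ln / 2) = ln from by omega] at hc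
  rw [hc, pvEvenVal_iff cs (a + ln / 2) (ln / 2) (by omega) (by omega)]

-- the slice xs[i:i+m] (0 ≤ i) in drop/take normal form
theorem pvSlice_struct (cs : List Char) (i m : Int) :
    PySem.List.slice cs (some i) (some (i + m)) =
      pvWin cs (PySem.List.clampIdx cs.length (i + m) - PySem.List.clampIdx cs.length i)
        (PySem.List.clampIdx cs.length i) := rfl

theorem pvClampIdx_nonneg (cs : List Char) (i : Int) (hi : 0 ≤ i) :
    ((PySem.List.clampIdx cs.length i : Nat) : Int) = min i (cs.length : Int) := by
  simp only [PySem.List.clampIdx]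
  rw [if_neg (by omega)]
  push_cast
  omega

theorem pvClampIdx_le (cs : List Char) (j : Int) : PySem.List.clampIdx cs.length j ≤ cs.length := by
  simp only [PySem.List.clampIdx]
  split_ifs <;> omega

theorem pvWin_length (cs : List Char) (l a : Nat) (h : a + l ≤ cs.length) :
    (pvWin cs l a).length = l := by
  unfold pvWin
  simp only [List.length_take, List.length_drop]
  omega

theorem pvDecision_eq (cs : List Char) (oddT evenT : List Nat)
    (hoT : oddT = (List.range cs.length).map (fun c => pvOddLoop cs c 0))
    (heT : evenT = (List.range (cs.length + 1)).map (fun c => pvEvenLoop cs c 0))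
    (m i : Int) (hi : 0 ≤ i)
    (hln : ¬ ((PySem.List.slice cs (some i) (some (i + m))).length : Int) ≤ 1) :
    (if PySem.Int.mod ((PySem.List.slice cs (some i) (some (i + m))).length : Int) 2 = 1
     then decide (((PySem.List.pyGetD oddT
        (min i (cs.length : Int) + PySem.Int.floordiv ((PySem.List.slice cs (some i) (some (i + m))).length : Int) 2) 0 : Nat) : Int) * 2 + 1
        ≥ ((PySem.List.slice cs (some i) (some (i + m))).length : Int))
     else decide (((PySem.List.pyGetD evenT
        (min i (cs.length : Int) + PySem.Int.floordiv ((PySem.List.slice cs (some i) (some (i + m))).length : Int) 2) 0 : Nat) : Int) * 2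
        ≥ ((PySem.List.slice cs (some i) (some (i + m))).length : Int)))
    = pvPal (PySem.List.slice cs (some i) (some (i + m))) := by
  have hs := pvSlice_struct cs i m
  set a := PySem.List.clampIdx cs.length i with ha
  set b := PySem.List.clampIdx cs.length (i + m) with hb
  have haL : a ≤ cs.length := pvClampIdx_le cs i
  have hbL : b ≤ cs.length := pvClampIdx_le cs (i + m)
  have hlen : (PySem.List.slice cs (some i) (some (i + m))).length = b - a := by
    rw [hs, pvWin_length cs (b - a) a (by omega)]
  set lnN := b - a with hlnN
  have h2 : 2 ≤ lnN := by
    rw [hlen] at hln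
    omega
  have hab : a + lnN = b := by omega
  have hmin : min i (cs.length : Int) = (a : Int) := (pvClampIdx_nonneg cs i hi).symm
  have hfd : PySem.Int.floordiv ((lnN : Nat) : Int) 2 = ((lnN / 2 : Nat) : Int) := by
    rw [PySem.Int.floordiv_eq_ediv_of_pos (by norm_num)]
    omega
  have hidx : min i (cs.length : Int) + PySem.Int.floordiv ((lnN : Nat) : Int) 2
      = ((a + lnN / 2 : Nat) : Int) := by
    rw [hmin, hfd]
    push_cast
    ring
  rw [hlen, hidx]
  have hcL : a + lnN / 2 < cs.length := by omega
  have hoddT : (PySem.List.pyGetD oddT ((a + lnN / 2 : Nat) : Int) 0) = pvOddLoop cs (a + lnN / 2) 0 := by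
    rw [hoT, PySem.List.pyGetD_natCast, List.getD_eq_getElem _ _ (by simp; omega)]
    simp
  have hevenT : (PySem.List.pyGetD evenT ((a + lnN / 2 : Nat) : Int) 0) = pvEvenLoop cs (a + lnN / 2) 0 := by
    rw [heT, PySem.List.pyGetD_natCast, List.getD_eq_getElem _ _ (by simp; omega)]
    simp
  have hmod : (PySem.Int.mod ((lnN : Nat) : Int) 2 = 1) ↔ lnN % 2 = 1 := by
    rw [PySem.Int.mod_eq_emod_of_pos (by norm_num)]
    omega
  by_cases hpar : lnN % 2 = 1
  · rw [if_pos (hmod.mpr hpar), hoddT, hs]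
    rw [Bool.eq_iff_iff, decide_eq_true_eq,
      pvPal_window_odd cs a lnN hpar (by omega)]
    have := Nat.div_le_self lnN 2
    constructor
    · intro h; omega
    · intro h; omega
  · rw [if_neg (fun hx => hpar (hmod.mp hx)), hevenT, hs]
    rw [Bool.eq_iff_iff, decide_eq_true_eq,
      pvPal_window_even cs a lnN (by omega) (by omega)]
    constructor
    · intro h; omega
    · intro h; omega

theorem pvScanB_rev (cs : List Char) (m : Int) (oddT evenT : List Nat)
    (hoT : oddT = (List.range cs.length).map (fun c => pvOddLoop cs c 0))
    (heT : evenT = (List.range (cs.length + 1)).map (fun c => pvEvenLoop cs c 0)) :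
    ∀ (l : List Int), (∀ i ∈ l, 0 ≤ i) →
      pvScanB cs m oddT evenT l.reverse =
        l.foldl (fun circular i =>
          let arr := PySem.List.slice cs (some i) (some (i + m))
          if arr == arr.reverse then arr else circular) [] := by
  intro l
  induction l using List.reverseRecOn with
  | nil => intro _; rfl
  | append_singleton ys y ih =>
    intro h0
    have hy : 0 ≤ y := h0 y (by simp)
    rw [List.reverse_append, List.reverse_singleton, List.singleton_append, List.foldl_append]
    simp only [List.foldl_cons, List.foldl_nil]
    rw [pvScanB]
    simp only [show ∀ s : List Char, (s == s.reverse) = pvPal s from fun _ => rfl]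
    by_cases hln : ((PySem.List.slice cs (some y) (some (y + m))).length : Int) ≤ 1
    · rw [if_pos hln,
        pvPal_small (PySem.List.slice cs (some y) (some (y + m))) (by omega), if_pos rfl]
    · rw [if_neg hln, pvDecision_eq cs oddT evenT hoT heT m y hy hln,
        ih (fun i hi => h0 i (by simp [hi]))]
      rfl

-- ===== VERDICT (by name: the statement is the Claim_ definition above) =====
theorem circular_letter_spec : Claim_equal_circular_letter := by
  intro array n m _
  unfold Spec_circular_letter circular_letter circular_letter_alt
  dsimp only
  rw [PySem.List.pyRange_neg_one_eq_reverse, show (-1 : Int) + 1 = 0 from rfl]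
  refine congrArg String.ofList ?_
  exact (pvScanB_rev array.toList m _ _ rfl rfl (PySem.List.pyRange 0 (n - m + 1) 1)
    (fun i hi => ((PySem.List.mem_pyRange_one).mp hi).1)).symm
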